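-- pv_equiv track=rewrite | github.com/Vansh41104/AI-Recomendation-Engine | test/embeddings_builder.py | re_collapse_hyphens
-- ===== SOURCE A (Python) =====
-- def re_collapse_hyphens(value: str) -> str:
--     result = []
--     previous_hyphen = False
--     for char in value:
--         if char == "-":
--             if not previous_hyphen:
--                 result.append(char)
--             previous_hyphen = True
--         else:
--             previous_hyphen = False
--             result.append(char)
--     return "".join(result).strip("-")
-- ===== SOURCE B (Python) =====
-- def re_collapse_hyphens(value: str) -> str:
--     return "-".join(p for p in value.split("-") if p)
-- ===== Notes on version B (the rewrite author's own statement) =====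
-- stated objective: idiomatic
-- what changed: Replaces the character-by-character state machine (previous_hyphen flag, append loop, final strip) with a split-on-hyphen / drop-empty-segments / rejoin one-liner.
import Mathlib
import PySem

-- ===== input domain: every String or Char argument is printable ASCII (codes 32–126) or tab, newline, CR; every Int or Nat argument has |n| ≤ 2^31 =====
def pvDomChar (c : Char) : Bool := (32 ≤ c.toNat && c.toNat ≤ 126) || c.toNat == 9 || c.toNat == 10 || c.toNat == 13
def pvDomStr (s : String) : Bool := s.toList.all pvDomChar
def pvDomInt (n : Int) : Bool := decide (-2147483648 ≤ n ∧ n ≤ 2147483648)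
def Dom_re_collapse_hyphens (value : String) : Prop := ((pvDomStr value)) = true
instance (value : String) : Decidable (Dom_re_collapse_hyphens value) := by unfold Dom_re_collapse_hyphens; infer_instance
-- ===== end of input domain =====

-- B replaces A's per-character state machine by split-on-hyphen / drop empty segments / rejoin (idiomatic; a timing run measured it faster by a constant factor).

-- ===== PORT A =====
def re_collapse_hyphens (value : String) : String :=
  let st := value.toList.foldl
    (fun (st : List Char × Bool) c =>
      if c = '-' then
        ((if st.2 then st.1 else st.1 ++ [c]), true)
      else
        (st.1 ++ [c], false))
    ([], false)
  PySem.Str.stripChars (String.ofList st.1) "-"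

-- ===== PORT B =====
def re_collapse_hyphens_alt (value : String) : String :=
  String.ofList (PySem.Chars.join ['-']
    ((PySem.Chars.splitOn value.toList ['-']).filter (fun p => !p.isEmpty)))

-- ===== PRECONDITION & SPEC =====
def Spec_re_collapse_hyphens (value : String) (out : String) : Prop := out = re_collapse_hyphens_alt value
instance (value : String) (out : String) : Decidable (Spec_re_collapse_hyphens value out) := by unfold Spec_re_collapse_hyphens; infer_instance

-- ===== CLAIM (what is proved, stated in full; the proofs are below) =====
def Claim_equal_re_collapse_hyphens : Prop := ∀ (value : String), Dom_re_collapse_hyphens value → Spec_re_collapse_hyphens value (re_collapse_hyphens value)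

-- ===== LEMMAS AND PROOFS =====

-- the hyphen predicate
def pvH (c : Char) : Bool := c == '-'

-- reference form of A's loop result
def pvCol : Bool → List Char → List Char
  | _, [] => []
  | prev, c :: r =>
      if c = '-' then (if prev then [] else ['-']) ++ pvCol true r
      else c :: pvCol false r

-- reference form of splitOn … ['-'] : (first segment, later segments)
def pvSeg : List Char → List Char × List (List Char)
  | [] => ([], [])
  | c :: r =>
      if c = '-' then ([], (pvSeg r).1 :: (pvSeg r).2)
      else (c :: (pvSeg r).1, (pvSeg r).2)

def pvSegs (cs : List Char) : List (List Char) :=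
  ((pvSeg cs).1 :: (pvSeg cs).2).filter (fun s => s ≠ [])

def pvJ (cs : List Char) : List Char := PySem.Chars.join ['-'] (pvSegs cs)

def pvRstrip (t : List Char) : List Char := (t.reverse.dropWhile pvH).reverse

lemma pvH_hyphen : pvH '-' = true := rfl

lemma pvH_of_ne {c : Char} (h : c ≠ '-') : pvH c = false := by simp [pvH, h]

lemma pvFoldl_col (cs : List Char) : ∀ res prev,
    (cs.foldl (fun (st : List Char × Bool) c =>
      if c = '-' then ((if st.2 then st.1 else st.1 ++ [c]), true)
      else (st.1 ++ [c], false)) (res, prev)).1 = res ++ pvCol prev cs := by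
  induction cs with
  | nil => intro res prev; simp [pvCol]
  | cons c r ih =>
      intro res prev
      by_cases hc : c = '-'
      · by_cases hp : prev <;> simp [hc, hp, pvCol, ih, List.append_assoc]
      · simp [hc, pvCol, ih, List.append_assoc]

lemma pvSplitOn_go (fuel : Nat) : ∀ (l cur : List Char) (acc : List (List Char)),
    l.length ≤ fuel →
    PySem.Chars.splitOn.go ['-'] fuel l cur acc
      = acc.reverse ++ (cur.reverse ++ (pvSeg l).1) :: (pvSeg l).2 := by
  induction fuel with
  | zero =>
      intro l cur acc h
      have : l = [] := List.length_eq_zero_iff.mp (Nat.le_zero.mp h)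
      subst this
      simp [PySem.Chars.splitOn.go, pvSeg]
  | succ n ih =>
      intro l cur acc h
      cases l with
      | nil => simp [PySem.Chars.splitOn.go, pvSeg]
      | cons c rest =>
          by_cases hc : c = '-'
          · subst hc
            have hpre : List.isPrefixOf ['-'] ('-' :: rest) = true := by
              simp [List.isPrefixOf]
            rw [PySem.Chars.splitOn.go]
            simp only [hpre, if_pos]
            have hd : List.drop (['-'] : List Char).length ('-' :: rest) = rest := rfl
            rw [hd, ih rest [] (cur.reverse :: acc) (by simpa using Nat.le_of_succ_le_succ h)]
            simp [pvSeg]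
          · have hpre : List.isPrefixOf ['-'] (c :: rest) = false := by
              simp only [List.isPrefixOf, Bool.and_eq_false_iff, beq_eq_false_iff_ne, ne_eq]
              exact Or.inl fun h => hc h.symm
            rw [PySem.Chars.splitOn.go]
            simp only [hpre, Bool.false_eq_true, if_false]
            rw [ih rest (c :: cur) acc (by simpa using Nat.le_of_succ_le_succ h)]
            simp [pvSeg, hc]

lemma pvSplitOn_eq (cs : List Char) :
    PySem.Chars.splitOn cs ['-'] = (pvSeg cs).1 :: (pvSeg cs).2 := by
  unfold PySem.Chars.splitOn
  rw [pvSplitOn_go (cs.length + 1) cs [] [] (Nat.le_succ _)]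
  simp

-- dropWhile pvH commutes past the collapse
lemma pvDrop_col_true (cs : List Char) :
    (pvCol true cs).dropWhile pvH = pvCol false (cs.dropWhile pvH) := by
  induction cs with
  | nil => simp [pvCol]
  | cons c r ih =>
      by_cases hc : c = '-'
      · simp [pvCol, hc, List.dropWhile_cons, pvH_hyphen, ih]
      · simp [pvCol, hc, List.dropWhile_cons, pvH_of_ne hc]

lemma pvDrop_col_false (cs : List Char) :
    (pvCol false cs).dropWhile pvH = pvCol false (cs.dropWhile pvH) := by
  cases cs with
  | nil => simp [pvCol]
  | cons c r =>
      by_cases hc : c = '-'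
      · simp [pvCol, hc, List.dropWhile_cons, pvH_hyphen, pvDrop_col_true]
      · simp [pvCol, hc, pvH_of_ne hc]

lemma pvSegs_dropWhile (cs : List Char) : pvSegs (cs.dropWhile pvH) = pvSegs cs := by
  induction cs with
  | nil => rfl
  | cons c r ih =>
      by_cases hc : c = '-'
      · subst hc
        rw [List.dropWhile_cons, pvH_hyphen]
        simp only [if_pos]
        rw [ih]
        simp [pvSegs, pvSeg]
      · rw [List.dropWhile_cons, pvH_of_ne hc]
        simp

-- pushing a hyphen-free block through pvCol / pvSeg
lemma pvCol_append (w t : List Char) (hw : ∀ c ∈ w, c ≠ '-') :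
    pvCol false (w ++ t) = w ++ pvCol false t := by
  induction w with
  | nil => rfl
  | cons c r ih =>
      have hc : c ≠ '-' := hw c (by simp)
      simp [pvCol, hc, ih (fun x hx => hw x (by simp [hx]))]

lemma pvSeg_append (w t : List Char) (hw : ∀ c ∈ w, c ≠ '-') :
    pvSeg (w ++ t) = (w ++ (pvSeg t).1, (pvSeg t).2) := by
  induction w with
  | nil => rfl
  | cons c r ih =>
      have hc : c ≠ '-' := hw c (by simp)
      simp [pvSeg, hc, ih (fun x hx => hw x (by simp [hx]))]

lemma pvSeg_no_hyphen (w : List Char) (hw : ∀ c ∈ w, c ≠ '-') : pvSeg w = (w, []) := by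
  have := pvSeg_append w [] hw
  simpa [pvSeg] using this

lemma pvCol_true_drop (cs : List Char) :
    pvCol true cs = pvCol false (cs.dropWhile pvH) := by
  induction cs with
  | nil => rfl
  | cons c r ih =>
      by_cases hc : c = '-'
      · simp [pvCol, hc, List.dropWhile_cons, pvH_hyphen, ih]
      · simp [pvCol, hc, List.dropWhile_cons, pvH_of_ne hc]

lemma pvRstrip_no_hyphen (w : List Char) (hw : ∀ c ∈ w, c ≠ '-') : pvRstrip w = w := by
  unfold pvRstrip
  have h : ∀ (hl : 0 < w.reverse.length), ¬ pvH (w.reverse[0]) = true := by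
    intro hl
    have hm : w.reverse[0] ∈ w := by simpa using List.getElem_mem hl
    simpa [pvH] using hw _ hm
  rw [List.dropWhile_eq_self_iff.mpr h, List.reverse_reverse]

lemma pvRstrip_append_hyphen (x : List Char) : pvRstrip (x ++ ['-']) = pvRstrip x := by
  unfold pvRstrip
  simp [List.dropWhile, pvH]

lemma pvRstrip_append (x y : List Char) (hy : pvRstrip y ≠ []) :
    pvRstrip (x ++ y) = x ++ pvRstrip y := by
  unfold pvRstrip at *
  rw [List.reverse_append, List.dropWhile_append]
  have : (y.reverse.dropWhile pvH).isEmpty = false := by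
    cases h : y.reverse.dropWhile pvH with
    | nil => exact absurd (by simp [h]) hy
    | cons a b => rfl
  simp [this]

lemma pvRstrip_ne_nil (y : List Char) (c : Char) (hc : c ≠ '-') (h : y.head? = some c) :
    pvRstrip y ≠ [] := by
  unfold pvRstrip
  intro hcon
  have hall : ∀ x ∈ y.reverse, pvH x = true := by
    intro x hx
    exact List.dropWhile_eq_nil_iff.mp (by simpa using hcon) x hx
  cases y with
  | nil => simp at h
  | cons a r =>
      have : pvH a = true := hall a (by simp)
      simp only [List.head?] at h
      have : a = '-' := by simpa [pvH] using this
      exact hc (by cases h; exact this.symm ▸ rfl)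

-- the central lemma: for inputs not starting with '-', right-strip of the collapse = join of nonempty segments
lemma pvMain : ∀ (n : Nat) (cs : List Char), cs.length ≤ n → (∀ c, cs.head? = some c → c ≠ '-') →
    pvRstrip (pvCol false cs) = pvJ cs := by
  intro n
  induction n with
  | zero =>
      intro cs h _
      have : cs = [] := List.length_eq_zero_iff.mp (Nat.le_zero.mp h)
      subst this
      simp [pvCol, pvRstrip, pvJ, pvSegs, pvSeg, PySem.Chars.join, List.intercalate]
  | succ n ih =>
      intro cs hlen hhd
      cases hcs0 : cs with
      | nil => simp [pvCol, pvRstrip, pvJ, pvSegs, pvSeg, PySem.Chars.join, List.intercalate]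
      | cons c0 r0 =>
          have hc0 : c0 ≠ '-' := by rw [hcs0] at hhd; exact hhd c0 rfl
          subst hcs0
          have hwfree : ∀ c ∈ (c0 :: r0).takeWhile (fun c => !pvH c), c ≠ '-' := by
            intro c hc
            simpa [pvH] using List.mem_takeWhile_imp hc
          have hwne : (c0 :: r0).takeWhile (fun c => !pvH c) ≠ [] := by
            rw [List.takeWhile_cons, pvH_of_ne hc0]
            simp
          have hwt : (c0 :: r0).takeWhile (fun c => !pvH c) ++ (c0 :: r0).dropWhile (fun c => !pvH c) = c0 :: r0 :=
            List.takeWhile_append_dropWhile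
          have hlsum : ((c0 :: r0).takeWhile (fun c => !pvH c)).length + ((c0 :: r0).dropWhile (fun c => !pvH c)).length = (c0 :: r0).length := by
            rw [← List.length_append, hwt]
          have hthd : ∀ c, ((c0 :: r0).dropWhile (fun c => !pvH c)).head? = some c → c = '-' := by
            intro c hch
            have hmt := List.head?_dropWhile_not (fun c => !pvH c) (c0 :: r0)
            rw [hch] at hmt
            simpa [pvH] using hmt
          generalize hW : (c0 :: r0).takeWhile (fun c => !pvH c) = w at hwfree hwne hwt hlsum
          generalize hT : (c0 :: r0).dropWhile (fun c => !pvH c) = t at hwt hlsum hthd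
          rw [← hwt, pvCol_append w t hwfree]
          cases htc : t with
          | nil =>
              simp only [List.append_nil, pvCol]
              rw [pvRstrip_no_hyphen w hwfree, pvJ, pvSegs, pvSeg_no_hyphen w hwfree]
              rw [List.filter_cons_of_pos (by simpa using hwne)]
              simp [PySem.Chars.join_singleton]
          | cons t0 t2 =>
              have ht0 : t0 = '-' := hthd t0 (by rw [htc]; rfl)
              subst ht0
              subst htc
              have hcolt : pvCol false ('-' :: t2) = '-' :: pvCol false (t2.dropWhile pvH) := by
                simp [pvCol, pvCol_true_drop]
              have hulen : (t2.dropWhile pvH).length ≤ n := by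
                have h1 : (t2.dropWhile pvH).length ≤ t2.length := List.length_dropWhile_le _ _
                have h2 : 1 ≤ w.length := by
                  cases w with
                  | nil => exact absurd rfl hwne
                  | cons _ _ => simp
                simp only [List.length_cons] at hlsum hlen
                omega
              have huhd : ∀ c, (t2.dropWhile pvH).head? = some c → c ≠ '-' := by
                intro c hch hcc
                have hmt := List.head?_dropWhile_not pvH t2
                rw [hch] at hmt
                simp [hcc, pvH] at hmt
              have hsegp : pvSeg (w ++ '-' :: t2) = (w, (pvSeg t2).1 :: (pvSeg t2).2) := by
                rw [pvSeg_append w ('-' :: t2) hwfree]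
                have h2 : pvSeg ('-' :: t2) = ([], (pvSeg t2).1 :: (pvSeg t2).2) := by
                  simp [pvSeg]
                rw [h2]
                simp
              have hsegs : pvSegs (w ++ '-' :: t2) = w :: pvSegs (t2.dropWhile pvH) := by
                rw [pvSegs, hsegp]
                rw [List.filter_cons_of_pos (by simpa using hwne)]
                congr 1
                rw [pvSegs_dropWhile t2]
                rfl
              rw [hcolt, pvJ, hsegs]
              cases hcu : t2.dropWhile pvH with
              | nil =>
                  rw [show pvCol false ([] : List Char) = [] from rfl]
                  rw [show w ++ '-' :: ([] : List Char) = w ++ ['-'] from rfl]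
                  rw [pvRstrip_append_hyphen w, pvRstrip_no_hyphen w hwfree]
                  rw [show pvSegs ([] : List Char) = [] by simp [pvSegs, pvSeg]]
                  rw [PySem.Chars.join_singleton]
              | cons u0 u2 =>
                  have hu0 : u0 ≠ '-' := huhd u0 (by rw [hcu]; rfl)
                  rw [← hcu]
                  have hrec : pvRstrip (pvCol false (t2.dropWhile pvH)) = pvJ (t2.dropWhile pvH) :=
                    ih _ hulen huhd
                  have hne : pvRstrip (pvCol false (t2.dropWhile pvH)) ≠ [] := by
                    apply pvRstrip_ne_nil _ u0 hu0
                    rw [hcu]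
                    simp [pvCol, hu0]
                  rw [show w ++ '-' :: pvCol false (t2.dropWhile pvH) = (w ++ ['-']) ++ pvCol false (t2.dropWhile pvH) by simp]
                  rw [pvRstrip_append _ _ hne, hrec]
                  have hsu : pvSegs (t2.dropWhile pvH) ≠ [] := by
                    rw [hcu]
                    simp [pvSegs, pvSeg, hu0, List.filter]
                  cases hsc : pvSegs (t2.dropWhile pvH) with
                  | nil => exact absurd hsc hsu
                  | cons sg ss =>
                      rw [pvJ, hsc, PySem.Chars.join_cons_cons]

lemma pvAB (cs : List Char) :
    PySem.Chars.stripChars (pvCol false cs) ['-']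
      = PySem.Chars.join ['-'] ((PySem.Chars.splitOn cs ['-']).filter (fun p => !p.isEmpty)) := by
  have hfilter : ∀ l : List (List Char),
      l.filter (fun p => !p.isEmpty) = l.filter (fun s => s ≠ []) := by
    intro l
    induction l with
    | nil => rfl
    | cons x xs ih => cases x <;> simp [ih]
  rw [pvSplitOn_eq, hfilter, ← pvSegs, ← pvJ]
  show ((((pvCol false cs).dropWhile (fun c => List.contains ['-'] c)).reverse.dropWhile
      (fun c => List.contains ['-'] c)).reverse) = pvJ cs
  have hp : (fun c => List.contains ['-'] c) = pvH := by
    funext c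
    simp only [List.contains_eq_mem, List.mem_singleton, pvH]
    rw [Bool.eq_iff_iff]
    simp
  rw [hp, pvDrop_col_false, ← pvRstrip]
  rw [pvMain (cs.dropWhile pvH).length _ le_rfl]
  · unfold pvJ
    rw [pvSegs_dropWhile]
  · intro c hc hcc
    subst hcc
    cases hd : cs.dropWhile pvH with
    | nil => rw [hd] at hc; simp at hc
    | cons a b =>
        rw [hd] at hc
        have ha : a = '-' := by simpa using hc
        have := List.head?_dropWhile_not pvH cs
        rw [hd] at this
        simp [ha, pvH] at this

-- ===== VERDICT (by name: the statement is the Claim_ definition above) =====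
theorem re_collapse_hyphens_spec : Claim_equal_re_collapse_hyphens := by
  intro value _
  unfold Spec_re_collapse_hyphens re_collapse_hyphens re_collapse_hyphens_alt
  simp only []
  rw [show (([], false) : List Char × Bool) = (([] : List Char), false) from rfl]
  rw [PySem.Str.stripChars]
  congr 1
  have := pvFoldl_col value.toList [] false
  simp only [List.nil_append] at this
  rw [this]
  simpa using pvAB value.toList
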